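-- pv_equiv track=rewrite | github.com/nschloe/tidytex | src/blacktex/main.py | _substitute_string_ranges
-- ===== SOURCE A (Python) =====
-- def _substitute_string_ranges(string, ranges, replacements):
--     if ranges:
--         lst = [string[: ranges[0][0]]]
--         for k, replacement in enumerate(replacements[:-1]):
--             lst += [replacement, string[ranges[k][1] : ranges[k + 1][0]]]
--         lst += [replacements[-1], string[ranges[-1][1] :]]
--         string = "".join(lst)
--     return string
-- ===== SOURCE B (Python) =====
-- def _substitute_string_ranges(string, ranges, replacements):
--     if not ranges:
--         return string
--     out = string[ranges[-1][1]:]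
--     for i in reversed(range(len(replacements))):
--         out = replacements[i] + out
--         if i:
--             out = string[ranges[i - 1][1]:ranges[i][0]] + out
--     return string[:ranges[0][0]] + out
-- ===== Notes on version B (the rewrite author's own statement) =====
-- stated objective: alternative
-- what changed: B traverses the replacement indices right-to-left and builds the output back-to-front by direct string concatenation (seeding the accumulator with the tail after the last range, prepending each replacement and the look-behind gap string[ranges[i-1][1]:ranges[i][0]]), instead of A's left-to-right list construction with a look-ahead to ranges[k+1] inside an enumerate loop, a separately appended last pair, and ''.join.
import Mathlib
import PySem

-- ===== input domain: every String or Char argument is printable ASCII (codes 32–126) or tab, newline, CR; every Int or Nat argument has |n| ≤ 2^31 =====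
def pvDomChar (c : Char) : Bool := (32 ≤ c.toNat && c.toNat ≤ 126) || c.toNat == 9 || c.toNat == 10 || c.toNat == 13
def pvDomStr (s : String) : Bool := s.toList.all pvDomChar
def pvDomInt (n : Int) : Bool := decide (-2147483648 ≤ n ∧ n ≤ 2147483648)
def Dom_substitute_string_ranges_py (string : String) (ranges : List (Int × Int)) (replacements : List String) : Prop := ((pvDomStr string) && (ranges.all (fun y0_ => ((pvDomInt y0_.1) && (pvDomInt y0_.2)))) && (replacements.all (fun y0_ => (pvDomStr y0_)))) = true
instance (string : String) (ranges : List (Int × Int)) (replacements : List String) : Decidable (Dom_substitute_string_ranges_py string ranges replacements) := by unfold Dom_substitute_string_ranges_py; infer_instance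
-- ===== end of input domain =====

-- B traverses the replacement indices right-to-left, building the output back-to-front by string concatenation (tail-seeded accumulator, look-behind gaps), instead of A's left-to-right list build with look-ahead and join; objective: alternative (same values, reversed construction).


-- ===== PORT A =====
def substitute_string_ranges_py (string : String) (ranges : List (Int × Int)) (replacements : List String) : String :=
  if ranges = [] then string
  else
    -- lst = [string[: ranges[0][0]]]
    let lst : List String := [PySem.Str.slice string none (some (PySem.List.pyGetD ranges 0 (0, 0)).1)]
    -- for k, replacement in enumerate(replacements[:-1]): lst += [replacement, string[ranges[k][1] : ranges[k+1][0]]]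
    -- (pyGetD defaults are unreachable under Pre_: every index used is in range there)
    let lst := (PySem.List.enumerate (PySem.List.slice replacements none (some (-1))) 0).foldl
      (fun lst kr =>
        lst ++ [kr.2, PySem.Str.slice string (some (PySem.List.pyGetD ranges kr.1 (0, 0)).2)
                        (some (PySem.List.pyGetD ranges (kr.1 + 1) (0, 0)).1)]) lst
    -- lst += [replacements[-1], string[ranges[-1][1] :]]
    let lst := lst ++ [PySem.List.pyGetD replacements (-1) "",
                       PySem.Str.slice string (some (PySem.List.pyGetD ranges (-1) (0, 0)).2) none]
    PySem.Str.join "" lst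

-- ===== PORT B =====
-- if not ranges: return string
-- out = string[ranges[-1][1]:]
-- for i in reversed(range(len(replacements))):
--     out = replacements[i] + out
--     if i: out = string[ranges[i-1][1]:ranges[i][0]] + out
-- return string[:ranges[0][0]] + out
def substitute_string_ranges_py_alt (string : String) (ranges : List (Int × Int)) (replacements : List String) : String :=
  if ranges = [] then string
  else
    let out := PySem.Str.slice string (some (PySem.List.pyGetD ranges (-1) (0, 0)).2) none
    let out := (List.range replacements.length).reverse.foldl
      (fun (out : String) (i : Nat) =>
        let out := PySem.List.pyGetD replacements (i : Int) "" ++ out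
        if i ≠ 0 then
          PySem.Str.slice string (some (PySem.List.pyGetD ranges ((i : Int) - 1) (0, 0)).2)
            (some (PySem.List.pyGetD ranges (i : Int) (0, 0)).1) ++ out
        else out) out
    PySem.Str.slice string none (some (PySem.List.pyGetD ranges 0 (0, 0)).1) ++ out

-- ===== PRECONDITION & SPEC =====
-- Pre_ excludes exactly the inputs on which A raises IndexError: ranges nonempty with replacements empty
-- (replacements[-1] raises) or with more replacements than ranges (ranges[k+1] raises in the loop).
def Pre_substitute_string_ranges_py (string : String) (ranges : List (Int × Int)) (replacements : List String) : Prop :=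
  ranges = [] ∨ (replacements ≠ [] ∧ replacements.length ≤ ranges.length)
instance (string : String) (ranges : List (Int × Int)) (replacements : List String) : Decidable (Pre_substitute_string_ranges_py string ranges replacements) := by unfold Pre_substitute_string_ranges_py; infer_instance

def pvWitness_substitute_string_ranges_py : String × (List (Int × Int)) × List String :=
  ("abcdef", [(1, 2), (4, 5)], ["X", "Y"])

def Spec_substitute_string_ranges_py (string : String) (ranges : List (Int × Int)) (replacements : List String) (out : String) : Prop := out = substitute_string_ranges_py_alt string ranges replacements
instance (string : String) (ranges : List (Int × Int)) (replacements : List String) (out : String) : Decidable (Spec_substitute_string_ranges_py string ranges replacements out) := by unfold Spec_substitute_string_ranges_py; infer_instance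

-- ===== CLAIM (what is proved, stated in full; the proofs are below) =====
def Claim_equal_substitute_string_ranges_py : Prop := ∀ (string : String) (ranges : List (Int × Int)) (replacements : List String), Dom_substitute_string_ranges_py string ranges replacements → Pre_substitute_string_ranges_py string ranges replacements → Spec_substitute_string_ranges_py string ranges replacements (substitute_string_ranges_py string ranges replacements)

-- ===== LEMMAS AND PROOFS =====

-- concatenation of a list of strings (the common normal form both ports are reduced to)
def pvCat (l : List String) : String := l.foldr (· ++ ·) ""

lemma pvCat_nil : pvCat [] = "" := rfl

lemma pvCat_cons (x : String) (l : List String) : pvCat (x :: l) = x ++ pvCat l := rfl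

lemma pv_join_eq (l : List String) : PySem.Str.join "" l = pvCat l := by
  induction l with
  | nil => simp [PySem.Str.join, PySem.Chars.join, List.intercalate, pvCat_nil]
  | cons x xs ih =>
      rw [pvCat_cons, ← ih]
      cases xs with
      | nil => simp [PySem.Str.join, PySem.Chars.join, List.intercalate, String.ofList_toList]
      | cons y ys => simp [PySem.Str.join, PySem.Chars.join, List.intercalate, String.ofList_append]

lemma pvCat_append (l1 l2 : List String) : pvCat (l1 ++ l2) = pvCat l1 ++ pvCat l2 := by
  induction l1 with
  | nil => simp [pvCat_nil]
  | cons x xs ih => simp [pvCat_cons, ih, String.append_assoc]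

lemma pvCat_flatMap {α : Type} (f : α → List String) (l : List α) :
    pvCat (l.flatMap f) = pvCat (l.map fun x => pvCat (f x)) := by
  induction l with
  | nil => rfl
  | cons x xs ih => simp [pvCat_cons, pvCat_append, ih]

-- a fold of prepends is the concatenation of the pieces in front of the seed
lemma pv_prepend_foldr {α : Type} (w : α → String) (init : String) :
    ∀ l : List α, l.foldr (fun i out => w i ++ out) init = pvCat (l.map w) ++ init := by
  intro l
  induction l with
  | nil => simp [pvCat_nil]
  | cons x xs ih => simp [pvCat_cons, ih, String.append_assoc]

-- the telescope: peeling the interleaving r0 g0 r1 g1 … r_K from the left instead of the right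
lemma pv_tele (r g : Nat → String) :
    ∀ K : Nat, pvCat ((List.range K).map (fun k => r k ++ g k)) ++ r K
      = r 0 ++ pvCat ((List.range K).map (fun k => g k ++ r (k + 1))) := by
  intro K
  induction K with
  | zero => simp [pvCat_nil]
  | succ K ih =>
      simp only [List.range_succ, List.map_append, pvCat_append, List.map_cons, List.map_nil,
        pvCat_cons, pvCat_nil]
      calc (pvCat ((List.range K).map (fun k => r k ++ g k)) ++ ((r K ++ g K) ++ "")) ++ r (K + 1)
          = (pvCat ((List.range K).map (fun k => r k ++ g k)) ++ r K) ++ (g K ++ r (K + 1)) := by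
            simp [String.append_assoc]
        _ = (r 0 ++ pvCat ((List.range K).map (fun k => g k ++ r (k + 1)))) ++ (g K ++ r (K + 1)) := by
            rw [ih]
        _ = r 0 ++ (pvCat ((List.range K).map (fun k => g k ++ r (k + 1))) ++ ((g K ++ r (K + 1)) ++ "")) := by
            simp [String.append_assoc]

-- the replacement at Nat index k and the gap slice between ranges k and k+1
def pvR (ps : List String) (k : Nat) : String := ps.getD k ""
def pvG (s : String) (rs : List (Int × Int)) (k : Nat) : String :=
  PySem.Str.slice s (some (PySem.List.pyGetD rs (k : Int) (0, 0)).2)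
    (some (PySem.List.pyGetD rs ((k : Int) + 1) (0, 0)).1)

lemma pv_pyGetD_nat {α : Type} (xs : List α) (k : Nat) (d : α) :
    PySem.List.pyGetD xs (k : Int) d = xs.getD k d := PySem.List.pyGetD_natCast xs k d

lemma pv_getD_dropLast (ps : List String) (k : Nat) (h : k + 1 < ps.length) :
    ps.dropLast.getD k "" = ps.getD k "" := by
  have h2 : ps[k]? = some ps[k] := List.getElem?_eq_getElem (by omega)
  simp [List.getD, show k < ps.length - 1 by omega, h2]

lemma pv_pyGetD_cast_succ {α : Type} (xs : List α) (k : Nat) (d : α) :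
    PySem.List.pyGetD xs ((k : Int) + 1) d = xs.getD (k + 1) d := by
  rw [show ((k : Int) + 1) = ((k + 1 : Nat) : Int) by push_cast; ring, pv_pyGetD_nat]

lemma pv_pyGetD_last (ps : List String) (_h : ps ≠ []) :
    PySem.List.pyGetD ps (-1) "" = ps.getD (ps.length - 1) "" := by
  simp [PySem.List.pyGetD, PySem.List.pyGet?_neg_one, List.getLast?_eq_getElem?, List.getD]

-- A reduced to the common normal form
lemma pv_a_eval (s : String) (a0 b0 : Int) (rs' : List (Int × Int)) (p0 : String) (ps'' : List String) :
    substitute_string_ranges_py s ((a0, b0) :: rs') (p0 :: ps'')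
      = PySem.Str.slice s none (some (PySem.List.pyGetD ((a0, b0) :: rs') 0 (0, 0)).1)
        ++ ((pvCat ((List.range ps''.length).map
              (fun k => pvR (p0 :: ps'') k ++ pvG s ((a0, b0) :: rs') k))
            ++ pvR (p0 :: ps'') ps''.length)
          ++ PySem.Str.slice s (some (PySem.List.pyGetD ((a0, b0) :: rs') (-1) (0, 0)).2) none) := by
  unfold substitute_string_ranges_py
  rw [if_neg (by simp)]
  simp only []
  rw [PySem.List.foldl_append_eq_flatMap
    (fun kr : Int × String =>
      [kr.2, PySem.Str.slice s (some (PySem.List.pyGetD ((a0, b0) :: rs') kr.1 (0, 0)).2)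
               (some (PySem.List.pyGetD ((a0, b0) :: rs') (kr.1 + 1) (0, 0)).1)])]
  rw [pv_join_eq, PySem.List.slice_to_neg_one]
  have henum := PySem.List.enumerate_eq_map_pyRange ((p0 :: ps'').dropLast) ""
  have hlen : PySem.List.len ((p0 :: ps'').dropLast) = (ps''.length : Int) := by
    simp [PySem.List.len]
  rw [hlen] at henum
  rw [henum, PySem.List.pyRange_zero_natCast, List.flatMap_map]
  simp only [pvCat_append, pvCat_cons, pvCat_nil]
  rw [pvCat_flatMap, List.map_map]
  simp only [Function.comp_def]
  have hmap : (List.range ps''.length).map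
        (fun x : Nat => pvCat
          [PySem.List.pyGetD ((p0 :: ps'').dropLast) ((x : Int)) "",
            PySem.Str.slice s (some (PySem.List.pyGetD ((a0, b0) :: rs') ((x : Int)) (0, 0)).2)
              (some (PySem.List.pyGetD ((a0, b0) :: rs') ((x : Int) + 1) (0, 0)).1)])
      = (List.range ps''.length).map
        (fun k => pvR (p0 :: ps'') k ++ pvG s ((a0, b0) :: rs') k) := by
    apply List.map_congr_left
    intro k hk
    have hk' : k < ps''.length := List.mem_range.mp hk
    simp only [pvCat_cons, pvCat_nil, pvR, pvG, pv_pyGetD_nat]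
    rw [pv_getD_dropLast (p0 :: ps'') k (by simp; omega)]
    simp
  rw [hmap]
  have hlast : PySem.List.pyGetD (p0 :: ps'') (-1) "" = pvR (p0 :: ps'') ps''.length := by
    rw [pv_pyGetD_last (p0 :: ps'') (by simp), pvR]
    simp
  rw [hlast]
  simp [String.append_assoc]

-- B reduced to the common normal form
lemma pv_b_eval (s : String) (a0 b0 : Int) (rs' : List (Int × Int)) (p0 : String) (ps'' : List String) :
    substitute_string_ranges_py_alt s ((a0, b0) :: rs') (p0 :: ps'')
      = PySem.Str.slice s none (some (PySem.List.pyGetD ((a0, b0) :: rs') 0 (0, 0)).1)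
        ++ ((pvR (p0 :: ps'') 0
            ++ pvCat ((List.range ps''.length).map
              (fun k => pvG s ((a0, b0) :: rs') k ++ pvR (p0 :: ps'') (k + 1))))
          ++ PySem.Str.slice s (some (PySem.List.pyGetD ((a0, b0) :: rs') (-1) (0, 0)).2) none) := by
  unfold substitute_string_ranges_py_alt
  rw [if_neg (by simp)]
  simp only []
  rw [List.foldl_reverse]
  have hbody : ∀ (i : Nat) (out : String),
      (if i ≠ 0 then
        PySem.Str.slice s (some (PySem.List.pyGetD ((a0, b0) :: rs') ((i : Int) - 1) (0, 0)).2)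
          (some (PySem.List.pyGetD ((a0, b0) :: rs') (i : Int) (0, 0)).1)
          ++ (PySem.List.pyGetD (p0 :: ps'') (i : Int) "" ++ out)
      else PySem.List.pyGetD (p0 :: ps'') (i : Int) "" ++ out)
      = (if i ≠ 0 then
          PySem.Str.slice s (some (PySem.List.pyGetD ((a0, b0) :: rs') ((i : Int) - 1) (0, 0)).2)
            (some (PySem.List.pyGetD ((a0, b0) :: rs') (i : Int) (0, 0)).1)
            ++ PySem.List.pyGetD (p0 :: ps'') (i : Int) ""
        else PySem.List.pyGetD (p0 :: ps'') (i : Int) "") ++ out := by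
    intro i out
    split_ifs <;> simp [String.append_assoc]
  simp only [hbody]
  rw [pv_prepend_foldr
    (fun i : Nat =>
      if i ≠ 0 then
        PySem.Str.slice s (some (PySem.List.pyGetD ((a0, b0) :: rs') ((i : Int) - 1) (0, 0)).2)
          (some (PySem.List.pyGetD ((a0, b0) :: rs') (i : Int) (0, 0)).1)
          ++ PySem.List.pyGetD (p0 :: ps'') (i : Int) ""
      else PySem.List.pyGetD (p0 :: ps'') (i : Int) "")]
  have hlen : (p0 :: ps'').length = ps''.length + 1 := by simp
  rw [hlen, List.range_succ_eq_map, List.map_cons, List.map_map, pvCat_cons]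
  simp [Function.comp_def, pvG, pvR, List.getD, String.append_assoc, pv_pyGetD_cast_succ]


theorem substitute_string_ranges_py_spec : Claim_equal_substitute_string_ranges_py := by
  intro s rs ps _ hpre
  unfold Spec_substitute_string_ranges_py
  cases rs with
  | nil =>
      unfold substitute_string_ranges_py substitute_string_ranges_py_alt
      rw [if_pos rfl, if_pos rfl]
  | cons hd rs' =>
      obtain ⟨a0, b0⟩ := hd
      rcases hpre with h | ⟨hps, _⟩
      · exact absurd h (by simp)
      cases ps with
      | nil => exact absurd rfl hps
      | cons p0 ps'' =>
          rw [pv_a_eval, pv_b_eval]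
          congr 1
          rw [pv_tele (pvR (p0 :: ps'')) (pvG s ((a0, b0) :: rs')) ps''.length]
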